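-- pv_equiv track=rewrite | github.com/KiraGol/hillel_python_basic | homework_5/task_3.py | validate_length_of_top_score_message
-- ===== SOURCE A (Python) =====
-- def validate_length_of_top_score_message(top_score: list, length: int = 150):
--     """
--     checks the length of a string
--     :param top_score: list
--     :param length: int (150)
--     :return: str
--     """
--     message_150 = " "
--     for item in top_score:
--         if len(item['message']) > length:
--             message_150 = item['message'][:150]
--         else:
--             message_150 = item['message']
--     return message_150
-- ===== SOURCE B (Python) =====
-- def _truncate(message, length):
--     """Keep the message if it fits, else cut to the hardcoded 150 characters."""
--     if len(message) <= length:
--         return message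
--     return message[:150]
--
--
-- def validate_length_of_top_score_message(top_score: list, length: int = 150):
--     """Simpler: only the last item matters, so read it directly instead of looping."""
--     if not top_score:
--         return " "
--     return _truncate(top_score[-1]['message'], length)
-- ===== Notes on version B (the rewrite author's own statement) =====
-- stated objective: simpler
-- what changed: A's loop only ever keeps the value computed for the final item, so B drops the loop, reads top_score[-1]['message'] directly, and delegates the cut to a small _truncate helper with the complementary test len(message) <= length (same single-space default for the empty list, same literal [:150] slice).
import Mathlib
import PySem

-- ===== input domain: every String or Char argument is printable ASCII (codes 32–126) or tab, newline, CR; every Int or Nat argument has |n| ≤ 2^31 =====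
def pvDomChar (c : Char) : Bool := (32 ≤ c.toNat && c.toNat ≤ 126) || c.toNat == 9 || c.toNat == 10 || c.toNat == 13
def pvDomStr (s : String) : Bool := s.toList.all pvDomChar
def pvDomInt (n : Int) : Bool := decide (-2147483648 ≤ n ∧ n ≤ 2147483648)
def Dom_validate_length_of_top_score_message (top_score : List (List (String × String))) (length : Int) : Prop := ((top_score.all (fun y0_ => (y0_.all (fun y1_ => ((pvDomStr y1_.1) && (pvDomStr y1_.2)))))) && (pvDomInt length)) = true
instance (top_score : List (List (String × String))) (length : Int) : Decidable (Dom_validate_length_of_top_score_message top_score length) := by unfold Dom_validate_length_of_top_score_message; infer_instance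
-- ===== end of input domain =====

-- B drops A's loop: only the last item's message is ever returned, so it is read directly (objective: simpler).

-- ===== PORT A =====
-- the loop body overwrites message_150 on every item; item['message'] is a dict lookup (KeyError = missing key, excluded by Pre_;
-- getD's default "" is never reached under Pre_)
def validate_length_of_top_score_message (top_score : List (List (String × String))) (length : Int) : String :=
  top_score.foldl
    (fun _message_150 item =>
      let m := PySem.Dict.getD (PySem.Dict.mk item) "message" ""
      if length < PySem.Str.len m then PySem.Str.slice m none (some 150) else m)
    " "

-- ===== PORT B =====
-- _truncate: keep the message if it fits, else cut to the hardcoded 150 characters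
def pvTruncate (message : String) (length : Int) : String :=
  if PySem.Str.len message ≤ length then message
  else PySem.Str.slice message none (some 150)

-- top_score[-1] on a non-empty list is the last element
def validate_length_of_top_score_message_alt (top_score : List (List (String × String))) (length : Int) : String :=
  if top_score.isEmpty then " "
  else pvTruncate (PySem.Dict.getD (PySem.Dict.mk top_score.getLast!) "message" "") length

-- ===== PRECONDITION & SPEC =====
-- Pre_ excludes exactly the inputs where Python A raises: some item lacks the 'message' key (KeyError).
-- (B raises only when the LAST item lacks it, so B still returns a value on part of the excluded region.)
def Pre_validate_length_of_top_score_message (top_score : List (List (String × String))) (length : Int) : Prop :=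
  ∀ item ∈ top_score, "message" ∈ item.map (·.1)
instance (top_score : List (List (String × String))) (length : Int) : Decidable (Pre_validate_length_of_top_score_message top_score length) := by unfold Pre_validate_length_of_top_score_message; infer_instance

def pvWitness_validate_length_of_top_score_message : (List (List (String × String))) × Int :=
  ([[("message", "hi")], [("message", "bye")]], 150)

def Spec_validate_length_of_top_score_message (top_score : List (List (String × String))) (length : Int) (out : String) : Prop := out = validate_length_of_top_score_message_alt top_score length
instance (top_score : List (List (String × String))) (length : Int) (out : String) : Decidable (Spec_validate_length_of_top_score_message top_score length out) := by unfold Spec_validate_length_of_top_score_message; infer_instance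

-- ===== CLAIM =====
def Claim_equal_validate_length_of_top_score_message : Prop := ∀ (top_score : List (List (String × String))) (length : Int), Dom_validate_length_of_top_score_message top_score length → Pre_validate_length_of_top_score_message top_score length → Spec_validate_length_of_top_score_message top_score length (validate_length_of_top_score_message top_score length)

-- ===== LEMMAS AND PROOFS =====
-- A's fold ignores its accumulator, so on a non-empty list it returns the value computed for the last item
lemma fold_last (l : List (List (String × String))) (x : List (String × String))
    (length : Int) (a : String) :
    (l ++ [x]).foldl
      (fun _message_150 item =>
        let m := PySem.Dict.getD (PySem.Dict.mk item) "message" ""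
        if length < PySem.Str.len m then PySem.Str.slice m none (some 150) else m)
      a
    = (let m := PySem.Dict.getD (PySem.Dict.mk x) "message" ""
       if length < PySem.Str.len m then PySem.Str.slice m none (some 150) else m) := by
  rw [List.foldl_append]
  rfl

-- A's 'len(m) > length ? m[:150] : m' and B's complementary 'len(m) ≤ length ? m : m[:150]' pick the same value
lemma truncate_eq_body (m : String) (length : Int) :
    pvTruncate m length
    = (if length < PySem.Str.len m then PySem.Str.slice m none (some 150) else m) := by
  unfold pvTruncate
  by_cases h : PySem.Str.len m ≤ length
  · rw [if_pos h, if_neg (by omega)]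
  · rw [if_neg h, if_pos (by omega)]

-- ===== VERDICT =====
theorem validate_length_of_top_score_message_spec : Claim_equal_validate_length_of_top_score_message := by
  intro ts length _ _
  unfold Spec_validate_length_of_top_score_message
  rcases List.eq_nil_or_concat ts with rfl | ⟨l, x, rfl⟩
  · rfl
  · unfold validate_length_of_top_score_message validate_length_of_top_score_message_alt
    rw [List.concat_eq_append, fold_last]
    have hgl : (l ++ [x]).getLast! = x := by
      rw [List.getLast!_eq_getLast?_getD, List.getLast?_concat]; rfl
    simp [hgl, truncate_eq_body]
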